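-- pv_equiv track=rewrite | github.com/nickmyatt/codility | counting_elements/max_counters.py | solution
-- ===== SOURCE A (Python) =====
-- def solution(N, operations):
--     MAX_COUNTER = N + 1
--     counters = [0] * N
--     max_ = 0
--     min_ = 0
--     for op in operations:
--         if op == MAX_COUNTER:
--             min_ = max_
--         else:
--             c = op - 1
--             counters[c] = max(counters[c], min_)
--             counters[c] += 1
--             max_ = max(max_, counters[c])
--     counters = [ max(c, min_) for c in counters ]
--     return counters
-- ===== SOURCE B (Python) =====
-- def solution(N, operations):
--     counters = [0] * N
--     for op in operations:
--         if op == N + 1: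
--             m = max(counters, default=0)
--             counters = [m] * N
--         else:
--             counters[op - 1] += 1
--     return counters
-- ===== Notes on version B (the rewrite author's own statement) =====
-- stated objective: simpler
-- what changed: Replaces A's lazy min_/max_ floor bookkeeping (deferred reset applied by a final map) with an eager plain counters list: a max-counter op rescans the list and overwrites every counter with the current maximum, otherwise counters[op-1] is incremented directly.
import Mathlib
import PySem

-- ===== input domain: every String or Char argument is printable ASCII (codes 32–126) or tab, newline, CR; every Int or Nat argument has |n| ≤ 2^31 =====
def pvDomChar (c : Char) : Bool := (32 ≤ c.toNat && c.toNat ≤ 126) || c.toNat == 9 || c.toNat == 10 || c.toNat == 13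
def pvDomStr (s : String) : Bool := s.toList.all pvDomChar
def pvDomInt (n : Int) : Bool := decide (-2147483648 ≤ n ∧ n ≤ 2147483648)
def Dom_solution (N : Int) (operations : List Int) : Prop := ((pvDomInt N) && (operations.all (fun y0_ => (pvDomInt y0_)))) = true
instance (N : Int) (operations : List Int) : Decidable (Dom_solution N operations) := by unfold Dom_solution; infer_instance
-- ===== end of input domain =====

-- B is SIMPLER, not faster: it keeps a plain counters list, eagerly overwriting all
-- counters with the current maximum on a max-counter op, instead of A's lazy min_/max_ floor.

-- ===== PORT A =====
def stepA (MAX_COUNTER : Int) (st : List Int × Int × Int) (op : Int) : List Int × Int × Int :=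
  if op = MAX_COUNTER then (st.1, st.2.1, st.2.1)
  else
    let c := op - 1
    let counters := PySem.List.pySetD st.1 c (max (PySem.List.pyGetD st.1 c 0) st.2.2)
    let v := PySem.List.pyGetD counters c 0 + 1
    (PySem.List.pySetD counters c v, max st.2.1 v, st.2.2)

def solution (N : Int) (operations : List Int) : List Int :=
  let MAX_COUNTER := N + 1
  let st := operations.foldl (stepA MAX_COUNTER) (PySem.List.pyRepeat [0] N, 0, 0)
  st.1.map (fun c => max c st.2.2)

-- ===== PORT B =====
def stepB (N : Int) (counters : List Int) (op : Int) : List Int :=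
  if op = N + 1 then
    PySem.List.pyRepeat [(PySem.List.max? counters (fun x => x)).getD 0] N
  else
    PySem.List.pySetD counters (op - 1) (PySem.List.pyGetD counters (op - 1) 0 + 1)

def solution_alt (N : Int) (operations : List Int) : List Int :=
  operations.foldl (stepB N) (PySem.List.pyRepeat [0] N)

-- ===== PRECONDITION & SPEC =====
-- Pre_ excludes exactly the inputs where A raises IndexError: an op other than N+1
-- whose index op-1 is outside Python's (negative-wrap) range of the length-N list.
def Pre_solution (N : Int) (operations : List Int) : Prop :=
  ∀ op ∈ operations, op = N + 1 ∨ PySem.Raise.InRange N.toNat (op - 1)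
instance (N : Int) (operations : List Int) : Decidable (Pre_solution N operations) := by
  unfold Pre_solution; infer_instance

def pvWitness_solution : Int × List Int := (5, [3, 4, 4, 6, 1, 4, 4])

def Spec_solution (N : Int) (operations : List Int) (out : List Int) : Prop := out = solution_alt N operations
instance (N : Int) (operations : List Int) (out : List Int) : Decidable (Spec_solution N operations out) := by unfold Spec_solution; infer_instance

-- ===== CLAIM (what is proved, stated in full; the proofs are below) =====
def Claim_equal_solution : Prop := ∀ (N : Int) (operations : List Int), Dom_solution N operations → Pre_solution N operations → Spec_solution N operations (solution N operations)

-- ===== LEMMAS AND PROOFS =====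

-- The coupling invariant between A's lazy state (counters, max_, min_) and B's eager list b.
def InvAB (N : Int) (st : List Int × Int × Int) (b : List Int) : Prop :=
  b = st.1.map (fun x => max x st.2.2) ∧
  st.2.1 = b.foldl max 0 ∧
  st.2.2 ≤ st.2.1 ∧ 0 ≤ st.2.2 ∧
  st.1.length = N.toNat

theorem foldl_max_out (t : List Int) (a b : Int) :
    t.foldl max (max a b) = max (t.foldl max a) b := by
  induction t generalizing a with
  | nil => rfl
  | cons x t ih =>
    simp only [List.foldl_cons]
    rw [show max (max a b) x = max (max a x) b by omega, ih]

theorem foldl_max_replicate (n : Nat) (a c : Int) :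
    (List.replicate n a).foldl max c = if n = 0 then c else max c a := by
  induction n generalizing c with
  | zero => rfl
  | succ m ih =>
    simp only [List.replicate_succ, List.foldl_cons, ih]
    rcases Nat.eq_zero_or_pos m with h | h
    · simp [h]
    · simp [Nat.pos_iff_ne_zero.mp h]

theorem foldl_max_set (xs : List Int) (j : Nat) (v a : Int)
    (hj : j < xs.length) (hv : xs.getD j 0 ≤ v) :
    (xs.set j v).foldl max a = max (xs.foldl max a) v := by
  induction xs generalizing j a with
  | nil => simp at hj
  | cons x t ih =>
    cases j with
    | zero =>
      simp only [List.set_cons_zero, List.foldl_cons]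
      rw [← foldl_max_out]
      congr 1
      simp only [List.getD_cons_zero] at hv
      omega
    | succ k =>
      simp only [List.set_cons_succ, List.foldl_cons]
      exact ih k (max a x) (by simpa using hj) (by simpa using hv)

-- max(counters, default=0) equals the running max from 0 when all elements are nonnegative.
theorem maxD_eq_foldl (b : List Int) (h : ∀ x ∈ b, 0 ≤ x) :
    ((PySem.List.max? b (fun x => x)).getD 0) = b.foldl max 0 := by
  cases b with
  | nil => rfl
  | cons x t =>
    rw [PySem.List.max?_id_cons]
    simp only [Option.getD_some, List.foldl_cons]
    rw [show max (0 : Int) x = x from max_eq_right (h x (by simp))]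

-- Under InRange, pyGetD/pySetD act at one resolved Nat index.
theorem resolve_idx (n : Nat) (c : Int) (h : PySem.Raise.InRange n c) :
    ∃ j : Nat, j < n ∧ ∀ (xs : List Int), xs.length = n →
      (∀ d : Int, PySem.List.pyGetD xs c d = xs.getD j d) ∧
      (∀ v : Int, PySem.List.pySetD xs c v = xs.set j v) := by
  simp only [PySem.Raise.InRange] at h
  by_cases hc : 0 ≤ c
  · refine ⟨c.toNat, by omega, fun xs hxs => ⟨?_, ?_⟩⟩
    · intro d
      rw [PySem.List.pyGetD_eq_getElem xs d hc (by rw [hxs]; exact_mod_cast h.2)]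
      rw [List.getD_eq_getElem?_getD, List.getElem?_eq_getElem (by omega)]
      simp
    · intro v; exact PySem.List.pySetD_of_nonneg xs v hc
  · refine ⟨n - (-c).toNat, by omega, fun xs hxs => ⟨?_, ?_⟩⟩
    · intro d
      have hk : 0 < (-c).toNat ∧ (-c).toNat ≤ xs.length := by omega
      rw [show c = -(((-c).toNat : Nat) : Int) by omega]
      rw [PySem.List.pyGetD_neg_natCast xs ((-c).toNat) d hk.1 hk.2]
      rw [List.getD_eq_getElem?_getD, List.getElem?_eq_getElem (by omega)]
      simp only [Option.getD_some]
      congr 1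
      omega
    · intro v
      simp only [PySem.List.pySetD, PySem.List.pySet?, PySem.List.pyIdx?]
      rw [if_neg hc, if_pos (by omega)]
      simp [hxs]

theorem elem_le_mx (b : List Int) (mx : Int) (hmx : mx = b.foldl max 0) :
    ∀ y ∈ b, y ≤ mx := by
  intro y hy
  subst hmx
  exact (PySem.List.le_foldl_max b 0).2 y hy

theorem step_inv (N : Int) (st : List Int × Int × Int) (b : List Int) (op : Int)
    (hI : InvAB N st b) (hop : op = N + 1 ∨ PySem.Raise.InRange N.toNat (op - 1)) :
    InvAB N (stepA (N + 1) st op) (stepB N b op) := by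
  obtain ⟨cnt, mx, mn⟩ := st
  obtain ⟨hb, hmx, hmn, hmn0, hlen⟩ := hI
  dsimp only at hb hmx hmn hmn0 hlen
  have hblen : b.length = N.toNat := by rw [hb]; simpa using hlen
  have hble := elem_le_mx b mx hmx
  by_cases hcase : op = N + 1
  · -- max-counter operation: A defers via min_, B rescans and overwrites
    simp only [stepA, stepB, if_pos hcase]
    have hbnn : ∀ x ∈ b, 0 ≤ x := by
      intro x hx
      rw [hb] at hx
      obtain ⟨y, _, hy⟩ := List.mem_map.mp hx
      omega
    have hmval : ((PySem.List.max? b (fun x => x)).getD 0) = mx :=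
      (maxD_eq_foldl b hbnn).trans hmx.symm
    rw [PySem.List.pyRepeat_singleton, hmval]
    refine ⟨?_, ?_, le_refl _, le_trans hmn0 hmn, hlen⟩
    · symm
      dsimp only
      rw [List.eq_replicate_iff]
      refine ⟨by simp [hlen], ?_⟩
      intro y hy
      obtain ⟨x, hxmem, hxy⟩ := List.mem_map.mp hy
      have hmem : max x mn ∈ b := hb ▸ List.mem_map.mpr ⟨x, hxmem, rfl⟩
      have := hble _ hmem
      omega
    · dsimp only
      rw [foldl_max_replicate]
      rcases Nat.eq_zero_or_pos N.toNat with h0 | h0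
      · have hbe : b = [] := List.eq_nil_of_length_eq_zero (by omega)
        simp [h0, hmx, hbe]
      · rw [if_neg (by omega)]
        omega
  · -- increment operation at (possibly negative) index op-1
    have hr : PySem.Raise.InRange N.toNat (op - 1) := hop.resolve_left hcase
    obtain ⟨j, hj, hres⟩ := resolve_idx N.toNat (op - 1) hr
    obtain ⟨hgc, hsc⟩ := hres cnt hlen
    obtain ⟨hgb, hsb⟩ := hres b hblen
    have hjc : j < cnt.length := by omega
    have hjb : j < b.length := by omega
    simp only [stepA, stepB, if_neg hcase]
    rw [hgc, hsc]
    obtain ⟨hgc1, hsc1⟩ := hres (cnt.set j (max (cnt.getD j 0) mn)) (by simpa using hlen)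
    rw [hgc1, hsc1, hgb, hsb]
    have hcntj : (cnt.set j (max (cnt.getD j 0) mn)).getD j 0 = max (cnt.getD j 0) mn := by
      rw [List.getD_eq_getElem?_getD, List.getElem?_set_self hjc]
      simp
    have hbj : b.getD j 0 = max (cnt.getD j 0) mn := by
      rw [hb, List.getD_eq_getElem?_getD, List.getElem?_map, List.getElem?_eq_getElem hjc]
      simp [List.getD_eq_getElem?_getD, List.getElem?_eq_getElem hjc]
    rw [hcntj, List.set_set, hbj]
    refine ⟨?_, ?_, ?_, hmn0, ?_⟩
    · dsimp only
      rw [List.map_set, ← hb]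
      congr 1
      omega
    · dsimp only
      rw [foldl_max_set b j _ 0 hjb (by omega), ← hmx]
    · dsimp only
      omega
    · simpa using hlen

theorem fold_inv (N : Int) (ops : List Int) (st : List Int × Int × Int) (b : List Int)
    (hI : InvAB N st b) (hpre : ∀ op ∈ ops, op = N + 1 ∨ PySem.Raise.InRange N.toNat (op - 1)) :
    InvAB N (ops.foldl (stepA (N + 1)) st) (ops.foldl (stepB N) b) := by
  induction ops generalizing st b with
  | nil => exact hI
  | cons op t ih =>
    exact ih _ _ (step_inv N st b op hI (hpre op (by simp)))
      (fun o ho => hpre o (by simp [ho]))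

-- ===== VERDICT (by name: the statement is the Claim_ definition above) =====
theorem solution_spec : Claim_equal_solution := by
  intro N operations _ hpre
  unfold Spec_solution solution solution_alt
  have h0 : InvAB N (PySem.List.pyRepeat [0] N, 0, 0) (PySem.List.pyRepeat [0] N) := by
    refine ⟨?_, ?_, le_refl _, le_refl _, by simp [PySem.List.pyRepeat_singleton]⟩
    · simp [PySem.List.pyRepeat_singleton, List.map_replicate]
    · simp [PySem.List.pyRepeat_singleton, foldl_max_replicate]
  have h := fold_inv N operations _ _ h0 hpre
  exact h.1.symm
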